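-- pv_equiv track=rewrite | github.com/CreditTone/hooker | hooker.py | convert_descriptor_to_readable
-- ===== SOURCE A (Python) =====
-- def convert_descriptor_to_readable(descriptor):
--     def type_map(d):
--         mapping = {
--             'I': 'int', 'Z': 'boolean', 'B': 'byte',
--             'S': 'short', 'J': 'long', 'F': 'float',
--             'D': 'double', 'C': 'char', 'V': 'void',
--         }
--         if d.startswith('L') and d.endswith(';'):
--             return d[1:-1].replace('/', '.').split('.')[-1]
--         return mapping.get(d, d)
--     args, ret = descriptor.split(')')
--     args = args[1:]  # remove opening '('
--     i = 0
--     parsed = []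
--     while i < len(args):
--         if args[i] == 'L':
--             j = i
--             while args[j] != ';':
--                 j += 1
--             parsed.append(type_map(args[i:j+1]))
--             i = j + 1
--         elif args[i] in "ZBSCIJFD":
--             parsed.append(type_map(args[i]))
--             i += 1
--         elif args[i] == '[':
--             dim = 0
--             while args[i] == '[':
--                 dim += 1
--                 i += 1
--             if args[i] == 'L':
--                 j = i
--                 while args[j] != ';':
--                     j += 1
--                 base = type_map(args[i:j+1])
--                 i = j + 1
--             else:
--                 base = type_map(args[i])
--                 i += 1
--             parsed.append(base + '[]' * dim)
--         else:
--             i += 1  # unknown type, skip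
--     return f"({', '.join(parsed)})"
-- ===== SOURCE B (Python) =====
-- def convert_descriptor_to_readable(descriptor):
--     mapping = {
--         'I': 'int', 'Z': 'boolean', 'B': 'byte',
--         'S': 'short', 'J': 'long', 'F': 'float',
--         'D': 'double', 'C': 'char', 'V': 'void',
--     }
--     args, ret = descriptor.split(')')
--     # single character-driven state machine over args[1:]:
--     # dim counts pending '[', buf is the class-name accumulator (None = not inside 'L...;')
--     parsed = []
--     dim = 0
--     buf = None
--     for c in args[1:]:
--         if buf is not None:
--             if c == ';':
--                 parsed.append(buf.replace('/', '.').split('.')[-1] + '[]' * dim)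
--                 dim = 0
--                 buf = None
--             else:
--                 buf += c
--         elif c == '[':
--             dim += 1
--         elif c == 'L':
--             buf = ''
--         elif dim > 0:
--             parsed.append(mapping.get(c, c) + '[]' * dim)
--             dim = 0
--         elif c in "ZBSCIJFD":
--             parsed.append(mapping[c])
--     return f"({', '.join(parsed)})"
-- ===== Notes on version B (the rewrite author's own statement) =====
-- stated objective: alternative
-- what changed: A's index-scanning loop with inner while-scans for '[' runs and 'L...;' class names is replaced by a single character-driven state machine: one pass over the characters carrying (pending array dimension, optional class-name buffer), with no index arithmetic or inner scans.
import Mathlib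
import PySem

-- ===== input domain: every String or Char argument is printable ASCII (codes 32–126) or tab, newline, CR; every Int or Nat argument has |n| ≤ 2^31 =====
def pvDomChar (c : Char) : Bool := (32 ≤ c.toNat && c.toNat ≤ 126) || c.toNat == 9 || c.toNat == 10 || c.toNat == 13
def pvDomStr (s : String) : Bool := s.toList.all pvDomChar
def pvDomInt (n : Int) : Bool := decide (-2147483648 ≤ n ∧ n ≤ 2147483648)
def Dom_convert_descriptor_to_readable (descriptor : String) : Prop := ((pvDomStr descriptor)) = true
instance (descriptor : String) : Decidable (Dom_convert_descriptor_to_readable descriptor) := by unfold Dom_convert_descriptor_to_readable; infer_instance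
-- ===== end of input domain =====

-- B replaces A's index-scanning loop (with inner while-scans) by a one-pass character-driven
-- state machine carrying a pending array dimension and an optional class-name buffer (objective: alternative).

-- ===== PORT A =====

-- A's dict literal inside type_map
def pvMapA : PySem.Dict (List Char) (List Char) := PySem.Dict.ofList
  [ (['I'], ['i','n','t']), (['Z'], ['b','o','o','l','e','a','n']), (['B'], ['b','y','t','e'])
  , (['S'], ['s','h','o','r','t']), (['J'], ['l','o','n','g']), (['F'], ['f','l','o','a','t'])
  , (['D'], ['d','o','u','b','l','e']), (['C'], ['c','h','a','r']), (['V'], ['v','o','i','d']) ]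

-- type_map(d); d[1:-1].replace('/','.').split('.')[-1]: split of a string never returns [], so [-1] is getLastD
def pvTypeMapA (d : List Char) : List Char :=
  if PySem.Chars.startswith d ['L'] && PySem.Chars.endswith d [';'] then
    (PySem.Chars.splitOn (PySem.Chars.replace (PySem.Chars.slice d (some 1) (some (-1))) ['/'] ['.']) ['.']).getLastD []
  else (pvMapA.get? d).getD d

-- '[]' * dim
def pvBracketsA (dim : Nat) : List Char := (List.replicate dim ['[',']']).flatten

def pvScalarsA : List Char := ['Z','B','S','C','I','J','F','D']

-- A's while-loop over index i, as recursion on the remaining characters (fuel = initial length).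
-- The [] results in the inner matches are where Python raises IndexError (excluded by Pre_).
def pvLoopA : Nat → List Char → List (List Char)
  | 0, _ => []
  | _, [] => []
  | fuel+1, c :: rest =>
    if c = 'L' then
      match (c :: rest).dropWhile (· ≠ ';') with
      | [] => []  -- IndexError: no ';' (excluded by Pre_)
      | _ :: tl => pvTypeMapA ((c :: rest).takeWhile (· ≠ ';') ++ [';']) :: pvLoopA fuel tl
    else if PySem.Chars.isIn [c] pvScalarsA then
      pvTypeMapA [c] :: pvLoopA fuel rest
    else if c = '[' then
      match (c :: rest).dropWhile (· = '[') with
      | [] => []  -- IndexError: args ends in '[' (excluded by Pre_)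
      | d :: tl =>
        if d = 'L' then
          match (d :: tl).dropWhile (· ≠ ';') with
          | [] => []  -- IndexError: no ';' (excluded by Pre_)
          | _ :: tl' =>
            (pvTypeMapA ((d :: tl).takeWhile (· ≠ ';') ++ [';']) ++ pvBracketsA (((c :: rest).takeWhile (· = '[')).length))
              :: pvLoopA fuel tl'
        else
          (pvTypeMapA [d] ++ pvBracketsA (((c :: rest).takeWhile (· = '[')).length)) :: pvLoopA fuel tl
    else pvLoopA fuel rest  -- unknown type, skip

-- args, ret = descriptor.split(')'): any other number of parts is a ValueError (excluded by Pre_)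
def pvMainA : List (List Char) → String
  | [a, _r] =>
    let args := PySem.Chars.slice a (some 1) none  -- args[1:]
    String.ofList ('(' :: PySem.Chars.join [',', ' '] (pvLoopA args.length args) ++ [')'])
  | _ => ""  -- ValueError (excluded by Pre_)

def convert_descriptor_to_readable (descriptor : String) : String :=
  pvMainA (PySem.Chars.splitOn descriptor.toList [')'])

-- ===== PORT B =====

def pvMapB : PySem.Dict (List Char) (List Char) := PySem.Dict.ofList
  [ (['I'], ['i','n','t']), (['Z'], ['b','o','o','l','e','a','n']), (['B'], ['b','y','t','e'])
  , (['S'], ['s','h','o','r','t']), (['J'], ['l','o','n','g']), (['F'], ['f','l','o','a','t'])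
  , (['D'], ['d','o','u','b','l','e']), (['C'], ['c','h','a','r']), (['V'], ['v','o','i','d']) ]

-- buf.replace('/', '.').split('.')[-1]
def pvClassB (b : List Char) : List Char :=
  (PySem.Chars.splitOn (PySem.Chars.replace b ['/'] ['.']) ['.']).getLastD []

def pvBrB (dim : Nat) : List Char := (List.replicate dim ['[',']']).flatten

-- one step of the state machine; state = (parsed, dim, buf)
def pvStepB (st : List (List Char) × Nat × Option (List Char)) (c : Char) :
    List (List Char) × Nat × Option (List Char) :=
  match st with
  | (parsed, dim, some b) =>
    if c = ';' then (parsed ++ [pvClassB b ++ pvBrB dim], 0, none)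
    else (parsed, dim, some (b ++ [c]))
  | (parsed, dim, none) =>
    if c = '[' then (parsed, dim + 1, none)
    else if c = 'L' then (parsed, dim, some [])
    else if 0 < dim then (parsed ++ [(pvMapB.get? [c]).getD [c] ++ pvBrB dim], 0, none)
    else if PySem.Chars.isIn [c] ['Z','B','S','C','I','J','F','D'] then
      (parsed ++ [(pvMapB.get? [c]).getD [c]], 0, none)  -- mapping[c]: always present for these keys
    else (parsed, dim, none)

def convert_descriptor_to_readable_alt (descriptor : String) : String :=
  match PySem.Chars.splitOn descriptor.toList [')'] with
  | [a, _r] =>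
    let st := (PySem.Chars.slice a (some 1) none).foldl pvStepB ([], 0, none)
    String.ofList ('(' :: PySem.Chars.join [',', ' '] st.1 ++ [')'])
  | _ => ""  -- ValueError from unpacking (excluded by Pre_)

-- ===== PRECONDITION & SPEC =====

-- Pre_ excludes exactly the inputs where A raises: a ')' count other than one (ValueError from the
-- unpacking split), and an argument list whose part after the last ';' contains an 'L' (unterminated
-- class name) or which ends in '[' (dangling array marker) — both IndexError in A's inner scans.
def Pre_convert_descriptor_to_readable (descriptor : String) : Prop :=
  (PySem.Chars.splitOn descriptor.toList [')']).length = 2 ∧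
  'L' ∉ ((((PySem.Chars.splitOn descriptor.toList [')']).getD 0 []).drop 1).reverse.takeWhile (· ≠ ';')) ∧
  (((PySem.Chars.splitOn descriptor.toList [')']).getD 0 []).drop 1).getLast? ≠ some '['

instance (descriptor : String) : Decidable (Pre_convert_descriptor_to_readable descriptor) := by
  unfold Pre_convert_descriptor_to_readable; infer_instance

def pvWitness_convert_descriptor_to_readable : String := "(ILjava/lang/String;[[D)V"

def Spec_convert_descriptor_to_readable (descriptor : String) (out : String) : Prop := out = convert_descriptor_to_readable_alt descriptor
instance (descriptor : String) (out : String) : Decidable (Spec_convert_descriptor_to_readable descriptor out) := by unfold Spec_convert_descriptor_to_readable; infer_instance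

-- ===== CLAIM (what is proved, stated in full; the proofs are below) =====
def Claim_equal_convert_descriptor_to_readable : Prop := ∀ (descriptor : String), Dom_convert_descriptor_to_readable descriptor → Pre_convert_descriptor_to_readable descriptor → Spec_convert_descriptor_to_readable descriptor (convert_descriptor_to_readable descriptor)

-- ===== LEMMAS AND PROOFS =====

-- proof-internal grammar check: args is a sequence of tokens '['* ('L' [^;]* ';' | one non-'[' char);
-- exactly the strings on which A's scan terminates without IndexError (fuel = length suffices)
def pvOkArgs : Nat → List Char → Bool
  | _, [] => true
  | 0, _ :: _ => false
  | fuel+1, s =>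
    match s.dropWhile (· = '[') with
    | [] => false
    | c :: tl =>
      if c = 'L' then
        match (c :: tl).dropWhile (· ≠ ';') with
        | [] => false
        | _ :: tl' => pvOkArgs fuel tl'
      else pvOkArgs fuel tl

-- the segment after the last ';' is unchanged by anything before a ';'
theorem pvLastSegAppend (xs ys : List Char) :
    (xs ++ ';' :: ys).reverse.takeWhile (· ≠ ';') = ys.reverse.takeWhile (· ≠ ';') := by
  rw [show (xs ++ ';' :: ys).reverse = ys.reverse ++ ';' :: xs.reverse by simp, List.takeWhile_append]
  split_ifs with h
  · have he : ys.reverse.takeWhile (· ≠ ';') = ys.reverse := (List.takeWhile_prefix _).eq_of_length h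
    rw [List.takeWhile_cons_of_neg (by simp), he]; simp
  · rfl

theorem pvMemLastSegTail (xs ys : List Char) (x : Char)
    (hx : x ∈ ys.reverse.takeWhile (· ≠ ';')) :
    x ∈ (xs ++ ys).reverse.takeWhile (· ≠ ';') := by
  rw [show (xs ++ ys).reverse = ys.reverse ++ xs.reverse by simp, List.takeWhile_append]
  split_ifs with h
  · exact List.mem_append_left _ ((List.takeWhile_prefix _).subset hx)
  · exact hx

-- the closed-form precondition implies A's scan succeeds
theorem pvOkArgs_of_pre : ∀ (fuel : Nat) (cs : List Char), cs.length ≤ fuel →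
    'L' ∉ cs.reverse.takeWhile (· ≠ ';') → cs.getLast? ≠ some '[' →
    pvOkArgs fuel cs = true := by
  intro fuel
  induction fuel with
  | zero =>
    intro cs h _ _
    have : cs = [] := List.length_eq_zero_iff.mp (Nat.le_zero.mp h)
    subst this; rfl
  | succ f ih =>
    intro cs hlen hL hlast
    match cs with
    | [] => rfl
    | c :: rest =>
      cases htail : List.dropWhile (· = '[') (c :: rest) with
      | nil =>
        -- every character is '[': the last one contradicts hlast
        exfalso
        have hall : ∀ x ∈ c :: rest, x = '[' := by
          have := List.dropWhile_eq_nil_iff.mp htail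
          simpa using this
        have hmem : (c :: rest).getLast (by simp) ∈ c :: rest := List.getLast_mem _
        have hg := List.getLast?_eq_some_getLast (l := c :: rest) (by simp)
        exact hlast (by rw [hg]; exact congrArg some (hall _ hmem))
      | cons d tl =>
        have htk : (c :: rest).takeWhile (· = '[') ++ d :: tl = c :: rest := by
          rw [← htail]; exact List.takeWhile_append_dropWhile
        have h3 := congrArg List.length htk
        simp only [List.length_append, List.length_cons] at h3
        simp only [pvOkArgs, htail]
        by_cases hdL : d = 'L'
        · subst hdL
          rw [if_pos rfl]
          cases hsemi : List.dropWhile (· ≠ ';') ('L' :: tl) with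
          | nil =>
            -- no ';' after this 'L': then 'L' is in the last segment, contradicting hL
            exfalso
            have hall : ∀ x ∈ 'L' :: tl, x ≠ ';' := by
              have := List.dropWhile_eq_nil_iff.mp hsemi
              simpa using this
            have hallcs : ∀ x ∈ c :: rest, x ≠ ';' := by
              intro x hx
              rw [← htk] at hx
              rcases List.mem_append.mp hx with h1 | h1
              · have := List.mem_takeWhile_imp h1
                simp at this; subst this; decide
              · exact hall x h1
            have hself : (c :: rest).reverse.takeWhile (· ≠ ';') = (c :: rest).reverse :=
              List.takeWhile_eq_self_iff.mpr (by
                intro x hx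
                simpa using hallcs x (List.mem_reverse.mp hx))
            apply hL
            rw [hself, List.mem_reverse, ← htk]
            exact List.mem_append_right _ (by simp)
          | cons x tl' =>
            have hxd : List.dropWhile (· ≠ ';') tl = x :: tl' := by
              rw [← hsemi, List.dropWhile_cons_of_pos (by simp)]
            have hx : x = ';' := by
              have h := List.head_dropWhile_not (· ≠ ';') (l := tl) (by rw [hxd]; simp)
              simp only [hxd] at h
              simpa using h
            subst hx
            have htk2 : tl.takeWhile (· ≠ ';') ++ ';' :: tl' = tl := by
              rw [← hxd]; exact List.takeWhile_append_dropWhile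
            have hlentl' : tl'.length ≤ f := by
              have h4 := congrArg List.length htk2
              simp only [List.length_append, List.length_cons] at h4
              simp only [List.length_cons] at hlen
              omega
            -- c :: rest = (prefix ++ ';' :: tl'), so the last segment is tl''s
            have hsplit : c :: rest
                = ((c :: rest).takeWhile (· = '[') ++ 'L' :: tl.takeWhile (· ≠ ';')) ++ ';' :: tl' := by
              conv_lhs => rw [← htk, ← htk2]
              simp
            apply ih tl' hlentl'
            · intro hmem
              apply hL
              rw [hsplit, pvLastSegAppend]
              exact hmem
            · cases htl' : tl' with
              | nil => simp
              | cons y ys =>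
                intro hcon
                apply hlast
                rw [hsplit, htl',
                  List.getLast?_append_of_ne_nil _ (by simp :  (';' :: y :: ys) ≠ [])]
                simpa using hcon
        · rw [if_neg hdL]
          have hlentl : tl.length ≤ f := by
            simp only [List.length_cons] at hlen; omega
          have hsplit : c :: rest = ((c :: rest).takeWhile (· = '[') ++ [d]) ++ tl := by
            conv_lhs => rw [← htk]
            simp
          apply ih tl hlentl
          · intro hmem
            apply hL
            rw [hsplit]
            exact pvMemLastSegTail _ _ _ hmem
          · cases htl : tl with
            | nil => simp
            | cons y ys =>
              intro hcon
              apply hlast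
              rw [hsplit, htl, List.getLast?_append_of_ne_nil _ (by simp : (y :: ys) ≠ [])]
              exact hcon

-- folding a run of '[' only increments dim
theorem pvFoldBrackets (bs : List Char) (hbs : ∀ x ∈ bs, x = '[')
    (parsed : List (List Char)) (d : Nat) :
    bs.foldl pvStepB (parsed, d, none) = (parsed, d + bs.length, none) := by
  induction bs generalizing d with
  | nil => simp
  | cons b bt ih =>
    have hb : b = '[' := hbs b (by simp)
    subst hb
    have := ih (fun x hx => hbs x (by simp [hx])) (d + 1)
    simp [List.foldl_cons, pvStepB, this]; omega

-- folding non-';' characters in buffer mode appends them to the buffer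
theorem pvFoldBuf (l : List Char) (hl : ∀ x ∈ l, x ≠ ';')
    (parsed : List (List Char)) (d : Nat) (b : List Char) :
    l.foldl pvStepB (parsed, d, some b) = (parsed, d, some (b ++ l)) := by
  induction l generalizing b with
  | nil => simp
  | cons x xt ih =>
    have hx : x ≠ ';' := hl x (by simp)
    have := ih (fun y hy => hl y (by simp [hy])) (b ++ [x])
    simp [List.foldl_cons, pvStepB, hx, this]

theorem pvTypeMapClass (body : List Char) :
    pvTypeMapA ('L' :: (body ++ [';'])) = pvClassB body := by
  have hs : PySem.Chars.startswith ('L' :: (body ++ [';'])) ['L'] = true := by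
    rw [PySem.Chars.startswith_iff]; exact ⟨body ++ [';'], rfl⟩
  have he : PySem.Chars.endswith ('L' :: (body ++ [';'])) [';'] = true := by
    rw [PySem.Chars.endswith_iff]
    have : ('L' :: body) ++ [';'] = 'L' :: (body ++ [';']) := by simp
    rw [← this]; exact List.suffix_append ('L' :: body) [';']
  have hsl : PySem.List.slice ('L' :: (body ++ [';'])) (some 1) (some (-1)) = body := by
    simp [PySem.List.slice]
  simp [pvTypeMapA, hs, he, hsl, pvClassB]

theorem pvTypeMapScalar (c : Char) (hc : c ≠ 'L') :
    pvTypeMapA [c] = (pvMapA.get? [c]).getD [c] := by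
  have hs : PySem.Chars.startswith [c] ['L'] = false := by
    rw [← Bool.not_eq_true, PySem.Chars.startswith_iff]
    simp [List.cons_prefix_cons]; exact fun h => (hc h.symm).elim
  simp [pvTypeMapA, hs]

-- main invariant: under pvOkArgs, the state machine computes A's parsed list
theorem pvFoldEq : ∀ (fuel : Nat) (cs : List Char), cs.length ≤ fuel →
    pvOkArgs fuel cs = true →
    ∀ parsed, cs.foldl pvStepB (parsed, 0, none) = (parsed ++ pvLoopA fuel cs, 0, none) := by
  intro fuel
  induction fuel with
  | zero =>
    intro cs h _ parsed
    have : cs = [] := List.length_eq_zero_iff.mp (Nat.le_zero.mp h)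
    subst this; simp [pvLoopA]
  | succ f ih =>
    intro cs hlen hok parsed
    match cs with
    | [] => simp [pvLoopA]
    | c :: rest =>
      have hbs : ∀ x ∈ (c :: rest).takeWhile (· = '['), x = '[' := by
        intro x hx; simpa using List.mem_takeWhile_imp hx
      cases htail : List.dropWhile (· = '[') (c :: rest) with
      | nil => simp only [pvOkArgs, htail] at hok; cases hok
      | cons d tl =>
        simp only [pvOkArgs, htail] at hok
        have hdne : d ≠ '[' := by
          have := List.head_dropWhile_not (· = '[') (l := c :: rest) (by simp [htail])
          simp [htail] at this; exact this
        have htk : (c :: rest).takeWhile (· = '[') ++ d :: tl = c :: rest := by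
          rw [← htail]; exact List.takeWhile_append_dropWhile
        have h3 := congrArg List.length htk
        simp only [List.length_append, List.length_cons] at h3
        -- the fold over cs = '['-run ++ d :: tl
        have hfold : (c :: rest).foldl pvStepB (parsed, 0, none)
            = (d :: tl).foldl pvStepB (parsed, ((c :: rest).takeWhile (· = '[')).length, none) := by
          conv_lhs => rw [← htk]
          rw [List.foldl_append, pvFoldBrackets _ hbs]; simp
        by_cases hdL : d = 'L'
        · -- class token
          subst hdL
          rw [if_pos rfl] at hok
          cases hsemi : List.dropWhile (· ≠ ';') ('L' :: tl) with
          | nil => rw [hsemi] at hok; cases hok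
          | cons x tl' =>
            rw [hsemi] at hok
            have hxd : List.dropWhile (· ≠ ';') tl = x :: tl' := by
              rw [← hsemi, List.dropWhile_cons_of_pos (by simp)]
            have hx : x = ';' := by
              have h := List.head_dropWhile_not (· ≠ ';') (l := tl) (by rw [hxd]; simp)
              simp only [hxd] at h
              simpa using h
            subst hx
            have hbody : ∀ y ∈ tl.takeWhile (· ≠ ';'), y ≠ ';' := by
              intro y hy; simpa using List.mem_takeWhile_imp hy
            have htk2 : tl.takeWhile (· ≠ ';') ++ ';' :: tl' = tl := by
              rw [← hxd]; exact List.takeWhile_append_dropWhile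
            have hlentl' : tl'.length ≤ f := by
              have h4 := congrArg List.length htk2
              simp only [List.length_append, List.length_cons] at h4
              simp only [List.length_cons] at hlen
              omega
            -- B side
            rw [hfold]
            have : ('L' :: tl).foldl pvStepB (parsed, ((c :: rest).takeWhile (· = '[')).length, none)
                = tl'.foldl pvStepB
                    (parsed ++ [pvClassB (tl.takeWhile (· ≠ ';')) ++ pvBrB (((c :: rest).takeWhile (· = '[')).length)], 0, none) := by
              rw [List.foldl_cons]
              have hstep : pvStepB (parsed, ((c :: rest).takeWhile (· = '[')).length, none) 'L'
                  = (parsed, ((c :: rest).takeWhile (· = '[')).length, some []) := by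
                simp [pvStepB]
              rw [hstep]
              conv_lhs => rw [← htk2]
              rw [List.foldl_append, pvFoldBuf _ hbody]
              simp [List.foldl_cons, pvStepB]
            rw [this, ih tl' hlentl' hok]
            -- A side
            have htwL : ('L' :: tl).takeWhile (· ≠ ';') ++ [';'] = 'L' :: (tl.takeWhile (· ≠ ';') ++ [';']) := by
              rw [List.takeWhile_cons_of_pos (by simp)]; rfl
            by_cases hbsnil : (c :: rest).takeWhile (· = '[') = []
            · -- no '[' run: c = 'L'
              have hcc : c = 'L' ∧ rest = tl := by
                rw [hbsnil] at htk; simp only [List.nil_append, List.cons.injEq] at htk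
                exact ⟨htk.1.symm, htk.2.symm⟩
              obtain ⟨hc1, hc2⟩ := hcc; subst hc1; subst hc2
              simp only [pvLoopA]
              rw [hsemi, htwL, pvTypeMapClass]
              simp [hbsnil, pvBrB]
            · -- '[' run then class
              have hc : c = '[' := by
                by_contra hne
                exact hbsnil (by rw [List.takeWhile_cons_of_neg]; simp [hne])
              subst hc
              have hnotin : PySem.Chars.isIn ['['] pvScalarsA = false := by decide
              simp only [pvLoopA, htail, hsemi]
              rw [htwL, pvTypeMapClass]
              simp [pvBrB, pvBracketsA, hnotin]
        · -- single-character token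
          rw [if_neg hdL] at hok
          have hlentl : tl.length ≤ f := by
            simp only [List.length_cons] at hlen; omega
          rw [hfold]
          by_cases hbsnil : (c :: rest).takeWhile (· = '[') = []
          · -- c = d, dim = 0
            have hcc : c = d ∧ rest = tl := by
              rw [hbsnil] at htk; simp only [List.nil_append, List.cons.injEq] at htk
              exact ⟨htk.1.symm, htk.2.symm⟩
            obtain ⟨hc1, hc2⟩ := hcc; subst hc1; subst hc2
            rw [hbsnil]
            simp only [List.length_nil, List.foldl_cons]
            by_cases hin : PySem.Chars.isIn [c] pvScalarsA = true
            · have hstep : pvStepB (parsed, 0, none) c = (parsed ++ [(pvMapB.get? [c]).getD [c]], 0, none) := by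
                simp only [pvStepB]
                rw [if_neg hdne, if_neg hdL, if_neg (by omega)]
                rw [if_pos (by exact hin)]
              rw [hstep, ih rest hlentl hok]
              simp only [pvLoopA, if_neg hdL, if_pos hin]
              rw [pvTypeMapScalar c hdL]
              simp [show pvMapB = pvMapA from rfl]
            · have hstep : pvStepB (parsed, 0, none) c = (parsed, 0, none) := by
                simp only [pvStepB]
                rw [if_neg hdne, if_neg hdL, if_neg (by omega)]
                rw [if_neg (by exact fun h => hin h)]
              rw [hstep, ih rest hlentl hok]
              simp only [pvLoopA, if_neg hdL]
              rw [if_neg (by exact fun h => hin h), if_neg hdne]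
          · -- '[' run then base char: dim > 0
            have hc : c = '[' := by
              by_contra hne
              exact hbsnil (by rw [List.takeWhile_cons_of_neg]; simp [hne])
            subst hc
            have hpos : 0 < (('[' :: rest).takeWhile (· = '[')).length :=
              List.length_pos_iff.mpr hbsnil
            rw [List.foldl_cons]
            have hstep : pvStepB (parsed, (('[' :: rest).takeWhile (· = '[')).length, none) d
                = (parsed ++ [(pvMapB.get? [d]).getD [d] ++ pvBrB ((('[' :: rest).takeWhile (· = '[')).length)], 0, none) := by
              simp only [pvStepB]
              rw [if_neg hdne, if_neg hdL, if_pos hpos]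
            rw [hstep, ih tl hlentl hok]
            have hnotin : PySem.Chars.isIn ['['] pvScalarsA = false := by decide
            simp only [pvLoopA, htail, if_neg hdL]
            rw [pvTypeMapScalar d hdL]
            simp [show pvMapB = pvMapA from rfl, pvBrB, pvBracketsA, hnotin]

-- ===== VERDICT (by name: the statement is the Claim_ definition above) =====
theorem convert_descriptor_to_readable_spec : Claim_equal_convert_descriptor_to_readable := by
  intro descriptor _ hpre
  obtain ⟨h2, hL, hlast⟩ := hpre
  unfold Spec_convert_descriptor_to_readable
  unfold convert_descriptor_to_readable convert_descriptor_to_readable_alt pvMainA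
  match hsp : PySem.Chars.splitOn descriptor.toList [')'] with
  | [] => simp [hsp] at h2
  | [a] => simp [hsp] at h2
  | a :: r :: p :: ps => simp [hsp] at h2
  | [a, r] =>
    rw [hsp] at hL hlast
    simp only [List.getD, List.getElem?_cons_zero, Option.getD_some] at hL hlast
    have hok : pvOkArgs (a.drop 1).length (a.drop 1) = true :=
      pvOkArgs_of_pre _ _ le_rfl hL hlast
    have hsl : PySem.Chars.slice a (some 1) none = a.drop 1 := by
      simp [PySem.Chars.slice_eq_listSlice, PySem.List.slice_from_one, List.drop_one]
    simp only [hsl]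
    rw [pvFoldEq _ _ le_rfl hok []]
    simp
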